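-- pv_equiv track=rewrite | github.com/Soualihou237/deepcpp_pred | 1_Predictor_CYP1A2.py | char_replacement
-- ===== SOURCE A (Python) =====
-- def char_replacement(list_smiles):
--     """
--     Replace the double characters into single character in a list of SMILES string.
--     Parameters
--     ----------
--     list_smiles: list
--         list of SMILES string describing a compound.
--     Returns
--     -------
--     list
--         list of SMILES with character replacement.
--     """
--     return [
--         smile.replace("Cl", "L")
--         .replace("Br", "R")
--         .replace("Se", "E")
--         .replace("Zn", "Z")
--         .replace("Si", "T")
--         .replace("@@", "$")
--         for smile in list_smiles
--     ]
-- ===== SOURCE B (Python) =====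
-- TOKENS = {"Cl": "L", "Br": "R", "Se": "E", "Zn": "Z", "Si": "T", "@@": "$"}
--
--
-- def _collapse(smile):
--     out = []
--     i = 0
--     while i < len(smile):
--         two = smile[i:i + 2]
--         if two in TOKENS:
--             out.append(TOKENS[two])
--             i += 2
--         else:
--             out.append(smile[i])
--             i += 1
--     return "".join(out)
--
--
-- def char_replacement(list_smiles):
--     return [_collapse(smile) for smile in list_smiles]
-- ===== Notes on version B (the rewrite author's own statement) =====
-- stated objective: alternative
-- what changed: Replaced the six chained full-string str.replace passes by a single greedy left-to-right scan per string that matches the 2-char window against a token dict (valid because no replacement character can start or complete any token); it trades six C-level passes for one Python-level pass.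
import Mathlib
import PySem

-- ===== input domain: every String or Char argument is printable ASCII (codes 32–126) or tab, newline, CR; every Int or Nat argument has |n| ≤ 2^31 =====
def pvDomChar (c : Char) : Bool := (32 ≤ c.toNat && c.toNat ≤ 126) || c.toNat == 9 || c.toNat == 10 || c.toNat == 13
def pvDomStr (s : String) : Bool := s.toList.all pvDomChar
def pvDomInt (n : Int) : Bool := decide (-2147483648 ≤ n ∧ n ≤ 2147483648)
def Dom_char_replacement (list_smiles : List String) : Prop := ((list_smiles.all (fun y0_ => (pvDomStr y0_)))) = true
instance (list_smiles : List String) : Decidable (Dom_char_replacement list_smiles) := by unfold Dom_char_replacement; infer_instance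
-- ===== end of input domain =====

-- B replaces A's six chained full-string .replace passes by one greedy left-to-right
-- 2-char-window scan per string (objective: alternative single-pass decomposition).


-- ===== PORT A =====
def char_replacement (list_smiles : List String) : List String :=
  list_smiles.map (fun smile =>
    PySem.Str.replace
      (PySem.Str.replace
        (PySem.Str.replace
          (PySem.Str.replace
            (PySem.Str.replace
              (PySem.Str.replace smile "Cl" "L")
              "Br" "R")
            "Se" "E")
          "Zn" "Z")
        "Si" "T")
      "@@" "$")

-- ===== PORT B =====
-- the token dict of Source B, keyed by the 2-char window
def tokenMap : List ((Char × Char) × Char) :=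
  [(('C', 'l'), 'L'), (('B', 'r'), 'R'), (('S', 'e'), 'E'),
   (('Z', 'n'), 'Z'), (('S', 'i'), 'T'), (('@', '@'), '$')]

-- Source B's _collapse: walk the string, try the 2-char window, else emit one char
def collapse : List Char → List Char
  | [] => []
  | [a] => [a]
  | a :: b :: t =>
    match tokenMap.lookup (a, b) with
    | some o => o :: collapse t
    | none => a :: collapse (b :: t)

def char_replacement_alt (list_smiles : List String) : List String :=
  list_smiles.map (fun smile => String.ofList (collapse smile.toList))

-- ===== PRECONDITION & SPEC =====
def Spec_char_replacement (list_smiles : List String) (out : List String) : Prop := out = char_replacement_alt list_smiles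
instance (list_smiles : List String) (out : List String) : Decidable (Spec_char_replacement list_smiles out) := by unfold Spec_char_replacement; infer_instance

-- ===== CLAIM (what is proved, stated in full; the proofs are below) =====
def Claim_equal_char_replacement : Prop := ∀ (list_smiles : List String), Dom_char_replacement list_smiles → Spec_char_replacement list_smiles (char_replacement list_smiles)

-- ===== LEMMAS AND PROOFS =====

-- one str.replace with a 2-char pattern and 1-char replacement, in natural recursion form
def rep2 (p1 p2 o : Char) : List Char → List Char
  | [] => []
  | [a] => [a]
  | a :: b :: t =>
    if a = p1 ∧ b = p2 then o :: rep2 p1 p2 o t else a :: rep2 p1 p2 o (b :: t)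

theorem replace_go_eq_rep2 (p1 p2 o : Char) (fuel : Nat) :
    ∀ (l acc : List Char), l.length ≤ fuel →
      PySem.Chars.replace.go [p1, p2] [o] fuel l acc = acc.reverse ++ rep2 p1 p2 o l := by
  induction fuel with
  | zero =>
    intro l acc h
    have : l = [] := List.eq_nil_of_length_eq_zero (Nat.le_zero.mp h)
    subst this
    simp [PySem.Chars.replace.go, rep2]
  | succ n ih =>
    intro l acc h
    match l with
    | [] => simp [PySem.Chars.replace.go, rep2]
    | [a] =>
      by_cases hp : a = p1 ∧ False
      · exact absurd hp.2 (by simp)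
      · have hpre : [p1, p2].isPrefixOf [a] = false := by
          simp [List.isPrefixOf]
        simp only [PySem.Chars.replace.go, hpre]
        rw [ih [] (a :: acc) (by simp)]
        simp [rep2]
    | a :: b :: t =>
      by_cases hm : a = p1 ∧ b = p2
      · obtain ⟨rfl, rfl⟩ := hm
        have hpre : [a, b].isPrefixOf (a :: b :: t) = true := by
          simp [List.isPrefixOf]
        simp only [PySem.Chars.replace.go, hpre, if_pos]
        rw [show List.drop [a, b].length (a :: b :: t) = t from rfl]
        rw [ih t ([o].reverse ++ acc) (by simp at h ⊢; omega)]
        simp [rep2]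
      · have hpre : [p1, p2].isPrefixOf (a :: b :: t) = false := by
          simp only [List.isPrefixOf]
          by_cases h1 : p1 = a
          · by_cases h2 : p2 = b
            · exact absurd ⟨h1.symm, h2.symm⟩ hm
            · simp [h2]
          · simp [h1]
        simp only [PySem.Chars.replace.go, hpre]
        rw [ih (b :: t) (a :: acc) (by simp at h ⊢; omega)]
        simp [rep2, hm]

theorem chars_replace_eq_rep2 (p1 p2 o : Char) (l : List Char) :
    PySem.Chars.replace l [p1, p2] [o] = rep2 p1 p2 o l := by
  rw [PySem.Chars.replace, if_neg (by simp)]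
  exact replace_go_eq_rep2 p1 p2 o l.length l [] (le_refl _)

-- the full six-pass chain of A, on char lists
def chainA (l : List Char) : List Char :=
  rep2 '@' '@' '$' (rep2 'S' 'i' 'T' (rep2 'Z' 'n' 'Z' (rep2 'S' 'e' 'E'
    (rep2 'B' 'r' 'R' (rep2 'C' 'l' 'L' l)))))

theorem rep2_cons_ne (p1 p2 o a : Char) (l : List Char)
    (h : ¬(a = p1 ∧ l.head? = some p2)) :
    rep2 p1 p2 o (a :: l) = a :: rep2 p1 p2 o l := by
  match l with
  | [] => simp [rep2]
  | b :: t =>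
    have : ¬(a = p1 ∧ b = p2) := by simpa using h
    simp [rep2, this]

theorem rep2_match (p1 p2 o : Char) (t : List Char) :
    rep2 p1 p2 o (p1 :: p2 :: t) = o :: rep2 p1 p2 o t := by
  simp [rep2]

theorem head?_rep2 (p1 p2 o : Char) (l : List Char) (c : Char)
    (h : (rep2 p1 p2 o l).head? = some c) : c = o ∨ l.head? = some c := by
  match l with
  | [] => simp [rep2] at h
  | [a] => simp [rep2] at h; simp [h]
  | a :: b :: t =>
    by_cases hm : a = p1 ∧ b = p2
    · simp [rep2, hm] at h; exact Or.inl h.symm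
    · simp [rep2, hm] at h; simp [h]

-- cumulative head characterisations of the partial chains
theorem head?_c1 (l : List Char) (c : Char)
    (h : (rep2 'C' 'l' 'L' l).head? = some c) : c = 'L' ∨ l.head? = some c :=
  head?_rep2 _ _ _ _ _ h

theorem head?_c2 (l : List Char) (c : Char)
    (h : (rep2 'B' 'r' 'R' (rep2 'C' 'l' 'L' l)).head? = some c) :
    c = 'R' ∨ c = 'L' ∨ l.head? = some c := by
  rcases head?_rep2 _ _ _ _ _ h with h' | h'
  · exact Or.inl h'
  · exact Or.inr (head?_c1 _ _ h')

theorem head?_c3 (l : List Char) (c : Char)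
    (h : (rep2 'S' 'e' 'E' (rep2 'B' 'r' 'R' (rep2 'C' 'l' 'L' l))).head? = some c) :
    c = 'E' ∨ c = 'R' ∨ c = 'L' ∨ l.head? = some c := by
  rcases head?_rep2 _ _ _ _ _ h with h' | h'
  · exact Or.inl h'
  · exact Or.inr (head?_c2 _ _ h')

theorem head?_c4 (l : List Char) (c : Char)
    (h : (rep2 'Z' 'n' 'Z' (rep2 'S' 'e' 'E' (rep2 'B' 'r' 'R'
        (rep2 'C' 'l' 'L' l)))).head? = some c) :
    c = 'Z' ∨ c = 'E' ∨ c = 'R' ∨ c = 'L' ∨ l.head? = some c := by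
  rcases head?_rep2 _ _ _ _ _ h with h' | h'
  · exact Or.inl h'
  · exact Or.inr (head?_c3 _ _ h')

theorem head?_c5 (l : List Char) (c : Char)
    (h : (rep2 'S' 'i' 'T' (rep2 'Z' 'n' 'Z' (rep2 'S' 'e' 'E' (rep2 'B' 'r' 'R'
        (rep2 'C' 'l' 'L' l))))).head? = some c) :
    c = 'T' ∨ c = 'Z' ∨ c = 'E' ∨ c = 'R' ∨ c = 'L' ∨ l.head? = some c := by
  rcases head?_rep2 _ _ _ _ _ h with h' | h'
  · exact Or.inl h'
  · exact Or.inr (head?_c4 _ _ h')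

-- passing a non-token head through the whole chain
theorem chainA_cons (a : Char) (l : List Char)
    (h : ∀ b, l.head? = some b → tokenMap.lookup (a, b) = none) :
    chainA (a :: l) = a :: chainA l := by
  unfold chainA
  rw [rep2_cons_ne 'C' 'l' 'L' a l (by
    rintro ⟨rfl, hb⟩
    have := h 'l' hb
    simp [tokenMap] at this)]
  rw [rep2_cons_ne 'B' 'r' 'R' a _ (by
    rintro ⟨rfl, hb⟩
    rcases head?_c1 _ _ hb with h' | h'
    · exact absurd h' (by decide)
    · have := h 'r' h'
      simp [tokenMap] at this)]
  rw [rep2_cons_ne 'S' 'e' 'E' a _ (by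
    rintro ⟨rfl, hb⟩
    rcases head?_c2 _ _ hb with h' | h' | h'
    · exact absurd h' (by decide)
    · exact absurd h' (by decide)
    · have := h 'e' h'
      simp [tokenMap] at this)]
  rw [rep2_cons_ne 'Z' 'n' 'Z' a _ (by
    rintro ⟨rfl, hb⟩
    rcases head?_c3 _ _ hb with h' | h' | h' | h'
    · exact absurd h' (by decide)
    · exact absurd h' (by decide)
    · exact absurd h' (by decide)
    · have := h 'n' h'
      simp [tokenMap] at this)]
  rw [rep2_cons_ne 'S' 'i' 'T' a _ (by
    rintro ⟨rfl, hb⟩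
    rcases head?_c4 _ _ hb with h' | h' | h' | h' | h'
    · exact absurd h' (by decide)
    · exact absurd h' (by decide)
    · exact absurd h' (by decide)
    · exact absurd h' (by decide)
    · have := h 'i' h'
      simp [tokenMap] at this)]
  rw [rep2_cons_ne '@' '@' '$' a _ (by
    rintro ⟨rfl, hb⟩
    rcases head?_c5 _ _ hb with h' | h' | h' | h' | h' | h'
    · exact absurd h' (by decide)
    · exact absurd h' (by decide)
    · exact absurd h' (by decide)
    · exact absurd h' (by decide)
    · exact absurd h' (by decide)
    · have := h '@' h'
      simp [tokenMap] at this)]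

theorem chainA_nil : chainA [] = [] := by decide

theorem chainA_single (a : Char) : chainA [a] = [a] := by
  simp [chainA, rep2]

-- the six token-match lemmas
theorem chainA_Cl (t : List Char) : chainA ('C' :: 'l' :: t) = 'L' :: chainA t := by
  unfold chainA
  rw [rep2_match]
  rw [rep2_cons_ne 'B' 'r' 'R' 'L' _ (by rintro ⟨h, -⟩; exact absurd h (by decide))]
  rw [rep2_cons_ne 'S' 'e' 'E' 'L' _ (by rintro ⟨h, -⟩; exact absurd h (by decide))]
  rw [rep2_cons_ne 'Z' 'n' 'Z' 'L' _ (by rintro ⟨h, -⟩; exact absurd h (by decide))]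
  rw [rep2_cons_ne 'S' 'i' 'T' 'L' _ (by rintro ⟨h, -⟩; exact absurd h (by decide))]
  rw [rep2_cons_ne '@' '@' '$' 'L' _ (by rintro ⟨h, -⟩; exact absurd h (by decide))]

theorem chainA_Br (t : List Char) : chainA ('B' :: 'r' :: t) = 'R' :: chainA t := by
  unfold chainA
  rw [rep2_cons_ne 'C' 'l' 'L' 'B' _ (by rintro ⟨h, -⟩; exact absurd h (by decide))]
  rw [rep2_cons_ne 'C' 'l' 'L' 'r' _ (by rintro ⟨h, -⟩; exact absurd h (by decide))]
  rw [rep2_match]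
  rw [rep2_cons_ne 'S' 'e' 'E' 'R' _ (by rintro ⟨h, -⟩; exact absurd h (by decide))]
  rw [rep2_cons_ne 'Z' 'n' 'Z' 'R' _ (by rintro ⟨h, -⟩; exact absurd h (by decide))]
  rw [rep2_cons_ne 'S' 'i' 'T' 'R' _ (by rintro ⟨h, -⟩; exact absurd h (by decide))]
  rw [rep2_cons_ne '@' '@' '$' 'R' _ (by rintro ⟨h, -⟩; exact absurd h (by decide))]

theorem chainA_Se (t : List Char) : chainA ('S' :: 'e' :: t) = 'E' :: chainA t := by
  unfold chainA
  rw [rep2_cons_ne 'C' 'l' 'L' 'S' _ (by rintro ⟨h, -⟩; exact absurd h (by decide))]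
  rw [rep2_cons_ne 'C' 'l' 'L' 'e' _ (by rintro ⟨h, -⟩; exact absurd h (by decide))]
  rw [rep2_cons_ne 'B' 'r' 'R' 'S' _ (by rintro ⟨h, -⟩; exact absurd h (by decide))]
  rw [rep2_cons_ne 'B' 'r' 'R' 'e' _ (by rintro ⟨h, -⟩; exact absurd h (by decide))]
  rw [rep2_match]
  rw [rep2_cons_ne 'Z' 'n' 'Z' 'E' _ (by rintro ⟨h, -⟩; exact absurd h (by decide))]
  rw [rep2_cons_ne 'S' 'i' 'T' 'E' _ (by rintro ⟨h, -⟩; exact absurd h (by decide))]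
  rw [rep2_cons_ne '@' '@' '$' 'E' _ (by rintro ⟨h, -⟩; exact absurd h (by decide))]

theorem chainA_Zn (t : List Char) : chainA ('Z' :: 'n' :: t) = 'Z' :: chainA t := by
  unfold chainA
  rw [rep2_cons_ne 'C' 'l' 'L' 'Z' _ (by rintro ⟨h, -⟩; exact absurd h (by decide))]
  rw [rep2_cons_ne 'C' 'l' 'L' 'n' _ (by rintro ⟨h, -⟩; exact absurd h (by decide))]
  rw [rep2_cons_ne 'B' 'r' 'R' 'Z' _ (by rintro ⟨h, -⟩; exact absurd h (by decide))]
  rw [rep2_cons_ne 'B' 'r' 'R' 'n' _ (by rintro ⟨h, -⟩; exact absurd h (by decide))]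
  rw [rep2_cons_ne 'S' 'e' 'E' 'Z' _ (by rintro ⟨h, -⟩; exact absurd h (by decide))]
  rw [rep2_cons_ne 'S' 'e' 'E' 'n' _ (by rintro ⟨h, -⟩; exact absurd h (by decide))]
  rw [rep2_match]
  rw [rep2_cons_ne 'S' 'i' 'T' 'Z' _ (by rintro ⟨h, -⟩; exact absurd h (by decide))]
  rw [rep2_cons_ne '@' '@' '$' 'Z' _ (by rintro ⟨h, -⟩; exact absurd h (by decide))]

theorem chainA_Si (t : List Char) : chainA ('S' :: 'i' :: t) = 'T' :: chainA t := by
  unfold chainA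
  rw [rep2_cons_ne 'C' 'l' 'L' 'S' _ (by rintro ⟨h, -⟩; exact absurd h (by decide))]
  rw [rep2_cons_ne 'C' 'l' 'L' 'i' _ (by rintro ⟨h, -⟩; exact absurd h (by decide))]
  rw [rep2_cons_ne 'B' 'r' 'R' 'S' _ (by rintro ⟨h, -⟩; exact absurd h (by decide))]
  rw [rep2_cons_ne 'B' 'r' 'R' 'i' _ (by rintro ⟨h, -⟩; exact absurd h (by decide))]
  rw [rep2_cons_ne 'S' 'e' 'E' 'S' _ (by rintro ⟨-, h⟩; simp at h)]
  rw [rep2_cons_ne 'S' 'e' 'E' 'i' _ (by rintro ⟨h, -⟩; exact absurd h (by decide))]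
  rw [rep2_cons_ne 'Z' 'n' 'Z' 'S' _ (by rintro ⟨h, -⟩; exact absurd h (by decide))]
  rw [rep2_cons_ne 'Z' 'n' 'Z' 'i' _ (by rintro ⟨h, -⟩; exact absurd h (by decide))]
  rw [rep2_match]
  rw [rep2_cons_ne '@' '@' '$' 'T' _ (by rintro ⟨h, -⟩; exact absurd h (by decide))]

theorem chainA_at (t : List Char) : chainA ('@' :: '@' :: t) = '$' :: chainA t := by
  unfold chainA
  rw [rep2_cons_ne 'C' 'l' 'L' '@' _ (by rintro ⟨h, -⟩; exact absurd h (by decide))]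
  rw [rep2_cons_ne 'C' 'l' 'L' '@' _ (by rintro ⟨h, -⟩; exact absurd h (by decide))]
  rw [rep2_cons_ne 'B' 'r' 'R' '@' _ (by rintro ⟨h, -⟩; exact absurd h (by decide))]
  rw [rep2_cons_ne 'B' 'r' 'R' '@' _ (by rintro ⟨h, -⟩; exact absurd h (by decide))]
  rw [rep2_cons_ne 'S' 'e' 'E' '@' _ (by rintro ⟨h, -⟩; exact absurd h (by decide))]
  rw [rep2_cons_ne 'S' 'e' 'E' '@' _ (by rintro ⟨h, -⟩; exact absurd h (by decide))]
  rw [rep2_cons_ne 'Z' 'n' 'Z' '@' _ (by rintro ⟨h, -⟩; exact absurd h (by decide))]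
  rw [rep2_cons_ne 'Z' 'n' 'Z' '@' _ (by rintro ⟨h, -⟩; exact absurd h (by decide))]
  rw [rep2_cons_ne 'S' 'i' 'T' '@' _ (by rintro ⟨h, -⟩; exact absurd h (by decide))]
  rw [rep2_cons_ne 'S' 'i' 'T' '@' _ (by rintro ⟨h, -⟩; exact absurd h (by decide))]
  rw [rep2_match]

-- case analysis on a successful dict lookup
theorem lookup_tokenMap {a b o : Char} (h : tokenMap.lookup (a, b) = some o) :
    (a = 'C' ∧ b = 'l' ∧ o = 'L') ∨ (a = 'B' ∧ b = 'r' ∧ o = 'R') ∨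
    (a = 'S' ∧ b = 'e' ∧ o = 'E') ∨ (a = 'Z' ∧ b = 'n' ∧ o = 'Z') ∨
    (a = 'S' ∧ b = 'i' ∧ o = 'T') ∨ (a = '@' ∧ b = '@' ∧ o = '$') := by
  simp only [tokenMap, List.lookup] at h
  repeat' split at h
  all_goals simp_all
  all_goals exact h.symm

-- main equivalence on char lists: the greedy scan equals the six-pass chain
theorem collapse_eq_chainA (l : List Char) : collapse l = chainA l := by
  induction l using collapse.induct with
  | case1 => simp [collapse, chainA_nil]
  | case2 a => simp [collapse, chainA_single]
  | case3 a b t o hlk ih =>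
    rw [collapse, hlk]
    rcases lookup_tokenMap hlk with ⟨rfl, rfl, rfl⟩ | ⟨rfl, rfl, rfl⟩ | ⟨rfl, rfl, rfl⟩ |
      ⟨rfl, rfl, rfl⟩ | ⟨rfl, rfl, rfl⟩ | ⟨rfl, rfl, rfl⟩ <;>
      simp [chainA_Cl, chainA_Br, chainA_Se, chainA_Zn, chainA_Si, chainA_at, ih]
  | case4 a b t hlk ih =>
    rw [collapse, hlk]
    rw [chainA_cons a (b :: t) (by intro c hc; simp at hc; subst hc; exact hlk), ih]

-- ===== VERDICT (by name: the statement is the Claim_ definition above) =====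
theorem char_replacement_spec : Claim_equal_char_replacement := by
  intro list_smiles _
  unfold Spec_char_replacement char_replacement char_replacement_alt
  apply List.map_congr_left
  intro s _
  rw [PySem.Str.replace]
  apply congrArg String.ofList
  simp only [PySem.Str.toList_replace]
  rw [show ("Cl" : String).toList = ['C', 'l'] from rfl,
      show ("L" : String).toList = ['L'] from rfl,
      show ("Br" : String).toList = ['B', 'r'] from rfl,
      show ("R" : String).toList = ['R'] from rfl,
      show ("Se" : String).toList = ['S', 'e'] from rfl,
      show ("E" : String).toList = ['E'] from rfl,
      show ("Zn" : String).toList = ['Z', 'n'] from rfl,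
      show ("Z" : String).toList = ['Z'] from rfl,
      show ("Si" : String).toList = ['S', 'i'] from rfl,
      show ("T" : String).toList = ['T'] from rfl,
      show ("@@" : String).toList = ['@', '@'] from rfl,
      show ("$" : String).toList = ['$'] from rfl]
  simp only [chars_replace_eq_rep2]
  rw [collapse_eq_chainA]
  simp [chainA]
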